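-- pv_equiv track=rewrite | github.com/PLSE-Lab/Python-MLAPI-expl | python_sources/game-of-jobs-all-features-must-confess.py | break_file_name
-- ===== SOURCE A (Python) =====
-- def break_file_name(x):
--     title = []
--     code = []
--     for i in x.split(' '):
--         if len(i) == 4 and i.isdigit()==True:
--             code.append(i)
--             break
--         title.append(i)
--     return (' '.join(title).strip(), ' '.join(code).strip())
-- ===== SOURCE B (Python) =====
-- def break_file_name(x):
--     tokens = x.split(' ')
--     idx = next((k for k, t in enumerate(tokens) if len(t) == 4 and t.isdigit()), None)
--     if idx is None:
--         return (' '.join(tokens).strip(), '')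
--     return (' '.join(tokens[:idx]).strip(), tokens[idx].strip())
-- ===== Notes on version B (the rewrite author's own statement) =====
-- stated objective: alternative
-- what changed: B locates the index of the first 4-digit token with enumerate/next and slices the token list there, instead of A's incremental accumulation into two lists with a break.
import Mathlib
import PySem

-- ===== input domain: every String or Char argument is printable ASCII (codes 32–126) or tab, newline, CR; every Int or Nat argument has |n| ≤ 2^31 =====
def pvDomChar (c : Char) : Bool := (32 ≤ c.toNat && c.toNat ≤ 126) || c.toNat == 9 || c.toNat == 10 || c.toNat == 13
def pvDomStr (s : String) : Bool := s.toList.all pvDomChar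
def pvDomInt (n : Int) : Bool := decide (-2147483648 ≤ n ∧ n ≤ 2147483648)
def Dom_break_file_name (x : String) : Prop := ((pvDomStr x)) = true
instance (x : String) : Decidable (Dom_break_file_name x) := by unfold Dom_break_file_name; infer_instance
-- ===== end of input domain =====

-- B replaces A's incremental two-list accumulation with locate-the-boundary-then-slice (alternative decomposition, same cost).

-- ===== PORT A =====
-- A's for-loop with break: structural recursion over the tokens carrying the two accumulators.
def pvALoop : List String → List String → List String → (List String × List String)
  | [], title, code => (title, code)
  | i :: rest, title, code =>
    if PySem.Str.len i == 4 && PySem.Str.strIsdigit i then (title, code ++ [i])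
    else pvALoop rest (title ++ [i]) code

def break_file_name (x : String) : String × String :=
  let r := pvALoop (((PySem.Str.split? x " ").getD [])) [] []
  (PySem.Str.strip (PySem.Str.join " " r.1), PySem.Str.strip (PySem.Str.join " " r.2))

-- ===== PORT B =====
def break_file_name_alt (x : String) : String × String :=
  let tokens := ((PySem.Str.split? x " ").getD [])
  match tokens.findIdx? (fun t => PySem.Str.len t == 4 && PySem.Str.strIsdigit t) with
  | none => (PySem.Str.strip (PySem.Str.join " " tokens), "")
  | some idx => (PySem.Str.strip (PySem.Str.join " " (tokens.take idx)), PySem.Str.strip (tokens.getD idx ""))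

-- ===== PRECONDITION & SPEC =====
def Spec_break_file_name (x : String) (out : String × String) : Prop := out = break_file_name_alt x
instance (x : String) (out : String × String) : Decidable (Spec_break_file_name x out) := by unfold Spec_break_file_name; infer_instance

-- ===== CLAIM (what is proved, stated in full; the proofs are below) =====
def Claim_equal_break_file_name : Prop := ∀ (x : String), Dom_break_file_name x → Spec_break_file_name x (break_file_name x)

-- ===== LEMMAS AND PROOFS =====
lemma pvALoop_eq :
    ∀ (ts title code : List String),
    pvALoop ts title code =
      match ts.findIdx? (fun t => PySem.Str.len t == 4 && PySem.Str.strIsdigit t) with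
      | none => (title ++ ts, code)
      | some idx => (title ++ ts.take idx, code ++ [ts.getD idx ""]) := by
  intro ts
  induction ts with
  | nil => intro title code; simp [pvALoop]
  | cons i rest ih =>
    intro title code
    by_cases h : (PySem.Str.len i == 4 && PySem.Str.strIsdigit i) = true
    · simp only [pvALoop, List.findIdx?_cons, h]
      simp
    · simp only [pvALoop, List.findIdx?_cons, h]
      rw [ih]
      cases rest.findIdx? (fun t => PySem.Str.len t == 4 && PySem.Str.strIsdigit t) with
      | none => simp
      | some idx => simp

-- ===== VERDICT (by name: the statement is the Claim_ definition above) =====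
theorem break_file_name_spec : Claim_equal_break_file_name := by
  intro x _
  unfold Spec_break_file_name break_file_name break_file_name_alt
  dsimp only
  rw [pvALoop_eq]
  generalize (List.findIdx? (fun t => PySem.Str.len t == 4 && PySem.Str.strIsdigit t)
      ((PySem.Str.split? x " ").getD [])) = o
  cases o with
  | none =>
    simp
    show PySem.Str.strip (PySem.Str.join " " []) = ""
    decide
  | some idx => simp [PySem.Str.join, PySem.Chars.join_singleton]
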